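-- pv_equiv track=rewrite | github.com/Daniel6784/pythonProject | Agent.py | calcTop
-- ===== SOURCE A (Python) =====
-- def calcTop(piece):
--     highest = dict()
--     for part in piece:
--         if not part[1] in highest.keys():
--             highest[part[1]] = part[0]
--         elif highest[part[1]] > part[0]:
--             highest[part[1]] = part[0]
--     return highest
-- ===== SOURCE B (Python) =====
-- def calcTop(piece):
--     groups = {}
--     for part in piece:
--         groups.setdefault(part[1], []).append(part[0])
--     return {k: min(v) for k, v in groups.items()}
-- ===== Notes on version B (the rewrite author's own statement) =====
-- stated objective: alternative
-- what changed: Instead of tracking a running minimum per key inline with membership/comparison branches, B groups all first-elements per key into lists in one pass and reduces each list with min in a separate dict comprehension.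
import Mathlib
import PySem

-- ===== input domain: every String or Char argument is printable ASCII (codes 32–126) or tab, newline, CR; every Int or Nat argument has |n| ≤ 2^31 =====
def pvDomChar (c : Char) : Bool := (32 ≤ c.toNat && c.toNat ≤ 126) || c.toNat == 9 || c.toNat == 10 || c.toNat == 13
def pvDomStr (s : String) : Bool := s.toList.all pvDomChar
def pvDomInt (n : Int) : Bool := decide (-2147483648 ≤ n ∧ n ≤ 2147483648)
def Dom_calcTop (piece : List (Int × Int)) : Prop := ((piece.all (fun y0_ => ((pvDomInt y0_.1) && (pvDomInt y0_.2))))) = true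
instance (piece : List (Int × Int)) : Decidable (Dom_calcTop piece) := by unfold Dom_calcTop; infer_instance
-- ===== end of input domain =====

-- B groups all first-elements per key into lists in one pass, then takes min per key in a
-- second pass (dict comprehension), instead of A's inline running-minimum branches; same cost.


-- ===== PORT A =====
-- 'highest[part[1]]' is read only when the key is present, so getD is exact there.
def calcTop (piece : List (Int × Int)) : List (Int × Int) :=
  (piece.foldl
    (fun highest part =>
      if ¬ (highest.contains part.2 = true) then highest.insert part.2 part.1
      else if highest.getD part.2 0 > part.1 then highest.insert part.2 part.1
      else highest)
    (PySem.Dict.empty)).items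

-- ===== PORT B =====
-- 'groups.setdefault(part[1], []).append(part[0])' is (as a pure map) exactly
-- Dict.modify part.2 [] (· ++ [part.1]).
def bGroups (piece : List (Int × Int)) : PySem.Dict Int (List Int) :=
  piece.foldl (fun groups part => groups.modify part.2 [] (fun v => v ++ [part.1]))
    PySem.Dict.empty

-- min(v) on a nonempty list of ints
def bMin (v : List Int) : Int := (PySem.List.min? v (fun x => x)).getD 0

def calcTop_alt (piece : List (Int × Int)) : List (Int × Int) :=
  (bGroups piece).items.map (fun q => (q.1, bMin q.2))

-- ===== PRECONDITION & SPEC =====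
def Spec_calcTop (piece : List (Int × Int)) (out : List (Int × Int)) : Prop := out = calcTop_alt piece
instance (piece : List (Int × Int)) (out : List (Int × Int)) : Decidable (Spec_calcTop piece out) := by unfold Spec_calcTop; infer_instance

-- ===== CLAIM (what is proved, stated in full; the proofs are below) =====
def Claim_equal_calcTop : Prop := ∀ (piece : List (Int × Int)), Dom_calcTop piece → Spec_calcTop piece (calcTop piece)

-- ===== LEMMAS AND PROOFS =====

lemma min?_id_append_singleton (v : List Int) (hv : v ≠ []) (x : Int) :
    PySem.List.min? (v ++ [x]) (fun y => y) =
      some (if x < bMin v then x else bMin v) := by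
  have h : ∃ m, PySem.List.min? v (fun y => y) = some m := by
    rcases v with _ | ⟨a, t⟩
    · simp at hv
    · simp only [PySem.List.min?, List.foldl_cons]
      clear hv
      induction t generalizing a with
      | nil => exact ⟨a, rfl⟩
      | cons b t ih =>
          simp only [List.foldl_cons]
          split <;> exact ih _
  rcases h with ⟨m, hm⟩
  have hb : bMin v = m := by simp [bMin, hm]
  rw [hb]
  simp only [PySem.List.min?] at hm ⊢
  rw [List.foldl_append, hm, List.foldl_cons, List.foldl_nil]
  split_ifs with hxm <;> simp [hxm]

lemma bMin_append_singleton (v : List Int) (hv : v ≠ []) (x : Int) :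
    bMin (v ++ [x]) = if x < bMin v then x else bMin v := by
  simp [bMin, min?_id_append_singleton v hv x]

lemma bMin_singleton (x : Int) : bMin [x] = x := rfl

-- the loop invariant: A's dict is B's group dict with every value list collapsed by bMin
lemma loop_inv (l : List (Int × Int)) :
    ∀ (hA : PySem.Dict Int Int) (gB : PySem.Dict Int (List Int)),
      hA.items = gB.items.map (fun q => (q.1, bMin q.2)) →
      gB.keys.Nodup →
      (∀ q ∈ gB.items, q.2 ≠ []) →
      (l.foldl
        (fun highest part =>
          if ¬ (highest.contains part.2 = true) then highest.insert part.2 part.1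
          else if highest.getD part.2 0 > part.1 then highest.insert part.2 part.1
          else highest) hA).items =
      (l.foldl (fun groups part => groups.modify part.2 [] (fun v => v ++ [part.1])) gB).items.map
        (fun q => (q.1, bMin q.2)) := by
  induction l with
  | nil => intro hA gB hitems _ _; simpa using hitems
  | cons p l ih =>
      intro hA gB hitems hnd hne
      simp only [List.foldl_cons]
      have hkeys : hA.keys = gB.keys := by
        simp only [PySem.Dict.keys, hitems, List.map_map]
        rfl
      have hcont : hA.contains p.2 = gB.contains p.2 := by
        rw [PySem.Dict.contains_eq_decide_mem_keys, PySem.Dict.contains_eq_decide_mem_keys, hkeys]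
      by_cases hc : gB.contains p.2 = true
      · -- key already present: A compares with running min; B appends to the list
        rcases (by rw [PySem.Dict.contains_eq_isSome_get?, Option.isSome_iff_exists] at hc
                   exact hc :
            ∃ v, gB.get? p.2 = some v) with ⟨v, hv⟩
        have hvmem : (p.2, v) ∈ gB.items := PySem.Dict.mem_items_of_get?_eq_some gB hv
        have hvne : v ≠ [] := hne _ hvmem
        have hAnd : hA.keys.Nodup := by rw [hkeys]; exact hnd
        have hAget : hA.getD p.2 0 = bMin v := by
          have hmem : (p.2, bMin v) ∈ hA.items := by
            rw [hitems]; exact List.mem_map_of_mem hvmem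
          exact PySem.Dict.getD_of_mem_items hA hmem hAnd 0
        have hBgetD : gB.getD p.2 [] = v := PySem.Dict.getD_of_get?_eq_some gB [] hv
        have hmodItems :
            (gB.modify p.2 [] (fun w => w ++ [p.1])).items =
              gB.items.map (fun q => if (q.1 == p.2) = true then (p.2, v ++ [p.1]) else q) := by
          simp only [PySem.Dict.modify, hBgetD]
          exact PySem.Dict.items_insert_of_contains gB _ hc
        have hmodNd : (gB.modify p.2 [] (fun w => w ++ [p.1])).keys.Nodup := by
          rw [PySem.Dict.keys_modify]
          exact PySem.Dict.nodup_keys_insert gB _ _ hnd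
        have hmodNe : ∀ q ∈ (gB.modify p.2 [] (fun w => w ++ [p.1])).items, q.2 ≠ [] := by
          intro q hq
          rw [hmodItems] at hq
          rcases List.mem_map.mp hq with ⟨r, hr, hrq⟩
          by_cases h1 : r.1 = p.2
          · simp only [h1, beq_self_eq_true, if_true] at hrq
            subst hrq; simp
          · rw [if_neg (by simpa using h1)] at hrq
            subst hrq; exact hne _ hr
        -- uniqueness of the key among items (identifies the replaced entry)
        have huniq : ∀ q ∈ gB.items, q.1 = p.2 → q = (p.2, v) := by
          intro q hq hq1
          have hg := PySem.Dict.get?_of_mem_items (d := gB) (k := q.1) (v := q.2) hq hnd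
          rw [hq1, hv] at hg
          cases q
          simp_all
        have hmap : gB.items.map ((fun q : Int × List Int => (q.1, bMin q.2)) ∘
              (fun q => if (q.1 == p.2) = true then (p.2, v ++ [p.1]) else q)) =
            gB.items.map (fun q => if (q.1 == p.2) = true then (p.2, bMin (v ++ [p.1]))
              else (q.1, bMin q.2)) := by
          refine List.map_congr_left ?_
          intro q _
          by_cases h1 : q.1 = p.2 <;> simp [h1]
        rw [hcont]
        simp only [hc, not_true, if_false]
        rw [hAget]
        by_cases hlt : bMin v > p.1
        · -- A overwrites with the strictly smaller value
          simp only [hlt, if_true]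
          rw [ih (hA.insert p.2 p.1) (gB.modify p.2 [] (fun w => w ++ [p.1])) ?_ hmodNd hmodNe]
          rw [PySem.Dict.items_insert_of_contains hA p.1 (by rw [hcont]; exact hc),
              hmodItems, hitems, List.map_map, List.map_map, hmap]
          refine List.map_congr_left ?_
          intro q hq
          by_cases h1 : q.1 = p.2
          · have hqv : q = (p.2, v) := huniq q hq h1
            subst hqv
            simp [bMin_append_singleton v hvne, show p.1 < bMin v from hlt]
          · simp [h1]
        · -- A keeps the old minimum; appending a ≥ value does not change the list min
          simp only [hlt, if_false]
          rw [ih hA (gB.modify p.2 [] (fun w => w ++ [p.1])) ?_ hmodNd hmodNe]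
          rw [hmodItems, hitems, List.map_map, hmap]
          refine (List.map_congr_left ?_).symm
          intro q hq
          by_cases h1 : q.1 = p.2
          · have hqv : q = (p.2, v) := huniq q hq h1
            subst hqv
            simp [bMin_append_singleton v hvne, show ¬ p.1 < bMin v from hlt]
          · simp [h1]
      · -- fresh key: both append a new entry
        have hc' : gB.contains p.2 = false := by simpa using hc
        have hmodItems :
            (gB.modify p.2 [] (fun w => w ++ [p.1])).items = gB.items ++ [(p.2, [p.1])] := by
          simp only [PySem.Dict.modify, PySem.Dict.getD_of_not_contains gB [] hc']
          simpa using PySem.Dict.items_insert_of_not_contains gB [p.1] hc'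
        rw [hcont]
        simp only [hc', Bool.false_eq_true, not_false_iff, if_true]
        exact ih (hA.insert p.2 p.1) (gB.modify p.2 [] (fun w => w ++ [p.1]))
          (by rw [PySem.Dict.items_insert_of_not_contains hA p.1 (by rw [hcont]; exact hc'),
                  hmodItems, hitems, List.map_append]
              simp [bMin_singleton])
          (by rw [PySem.Dict.keys_modify]
              exact PySem.Dict.nodup_keys_insert gB _ _ hnd)
          (by intro q hq
              rw [hmodItems] at hq
              rcases List.mem_append.mp hq with h | h
              · exact hne _ h
              · simp only [List.mem_singleton] at h
                subst h; simp)

-- ===== VERDICT (by name: the statement is the Claim_ definition above) =====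
theorem calcTop_spec : Claim_equal_calcTop := by
  intro piece _
  unfold Spec_calcTop calcTop calcTop_alt bGroups
  exact loop_inv piece PySem.Dict.empty PySem.Dict.empty (by rfl)
    (PySem.Dict.nodup_keys_empty)
    (by intro q hq; simp [PySem.Dict.empty] at hq)
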